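-- pv_equiv track=rewrite | github.com/corlin/finetune_memsafe | src/evaluation/data_preprocessor.py | _calculate_skipped_indices
-- ===== SOURCE A (Python) =====
-- from typing import Dict, List, Any, Optional, Tuple
--
-- def _calculate_skipped_indices(batch: Dict[str, List], valid_indices: List[int]) -> List[int]:
--     """计算跳过的索引"""
--     if not batch:
--         return []
--
--     # 获取总样本数
--     total_samples = 0
--     for field_data in batch.values():
--         if isinstance(field_data, list):
--             total_samples = max(total_samples, len(field_data))
--
--     # 计算跳过的索引
--     all_indices = set(range(total_samples))
--     valid_indices_set = set(valid_indices)
--     skipped_indices = list(all_indices - valid_indices_set)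
--
--     return sorted(skipped_indices)
-- ===== SOURCE B (Python) =====
-- def _calculate_skipped_indices(batch, valid_indices):
--     total = 0
--     for field_data in batch.values():
--         if isinstance(field_data, list):
--             total = max(total, len(field_data))
--     out = []
--     prev = 0
--     for v in sorted(set(v for v in valid_indices if 0 <= v < total)):
--         out.extend(range(prev, v))
--         prev = v + 1
--     out.extend(range(prev, total))
--     return out
-- ===== Notes on version B (the rewrite author's own statement) =====
-- stated objective: alternative
-- what changed: Instead of building set(range(total)), subtracting the valid set and sorting the result, B sorts the deduplicated in-range valid indices once and emits the complement as gap ranges between consecutive valid indices in a single pass, never touching or testing the skipped indices individually.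
import Mathlib
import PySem

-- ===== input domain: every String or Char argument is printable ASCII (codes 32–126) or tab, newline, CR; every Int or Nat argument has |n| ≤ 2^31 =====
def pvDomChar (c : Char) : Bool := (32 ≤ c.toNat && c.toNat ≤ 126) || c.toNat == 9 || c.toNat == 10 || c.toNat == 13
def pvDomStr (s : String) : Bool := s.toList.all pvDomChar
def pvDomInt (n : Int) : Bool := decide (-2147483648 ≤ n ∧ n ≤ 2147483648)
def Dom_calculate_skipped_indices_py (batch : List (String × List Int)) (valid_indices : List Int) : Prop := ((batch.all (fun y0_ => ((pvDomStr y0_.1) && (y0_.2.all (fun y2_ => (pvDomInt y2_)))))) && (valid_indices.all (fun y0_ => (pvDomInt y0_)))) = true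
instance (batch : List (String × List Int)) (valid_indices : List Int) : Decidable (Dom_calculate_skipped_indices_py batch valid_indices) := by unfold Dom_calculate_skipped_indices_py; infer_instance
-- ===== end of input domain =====

-- B replaces A's universe-set difference + sort of the result by sorting the deduplicated
-- in-range valid indices once and emitting the skipped indices as the gap ranges between
-- consecutive valid indices in one pass (objective: alternative algorithm).

-- ===== PORT A =====
def calculate_skipped_indices_py (batch : List (String × List Int)) (valid_indices : List Int) : List Int :=
  if batch = [] then []
  else
    -- total_samples = max over field lengths (isinstance(field_data, list) is always true here)
    let total_samples : Int := batch.foldl (fun acc kv => max acc (kv.2.length : Int)) 0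
    let all_indices := PySem.Set.ofList (PySem.List.pyRange 0 total_samples 1)
    let valid_indices_set := PySem.Set.ofList valid_indices
    let skipped_indices := PySem.Set.diff all_indices valid_indices_set
    PySem.List.sorted skipped_indices (fun x => x) false

-- ===== PORT B =====
def calculate_skipped_indices_py_alt (batch : List (String × List Int)) (valid_indices : List Int) : List Int :=
  let total : Int := batch.foldl (fun acc kv => max acc (kv.2.length : Int)) 0
  -- sorted(set(v for v in valid_indices if 0 <= v < total))
  let vs : List Int := PySem.List.sorted
      (PySem.Set.ofList (valid_indices.filter (fun v => decide (0 ≤ v) && decide (v < total))))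
      (fun x => x) false
  -- out = []; prev = 0; for v in vs: out.extend(range(prev, v)); prev = v + 1
  let st : List Int × Int := vs.foldl (fun st v => (st.1 ++ PySem.List.pyRange st.2 v 1, v + 1)) ([], 0)
  st.1 ++ PySem.List.pyRange st.2 total 1

-- ===== PRECONDITION & SPEC =====
def Spec_calculate_skipped_indices_py (batch : List (String × List Int)) (valid_indices : List Int) (out : List Int) : Prop := out = calculate_skipped_indices_py_alt batch valid_indices
instance (batch : List (String × List Int)) (valid_indices : List Int) (out : List Int) : Decidable (Spec_calculate_skipped_indices_py batch valid_indices out) := by unfold Spec_calculate_skipped_indices_py; infer_instance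

-- ===== CLAIM (what is proved, stated in full; the proofs are below) =====
def Claim_equal_calculate_skipped_indices_py : Prop := ∀ (batch : List (String × List Int)) (valid_indices : List Int), Dom_calculate_skipped_indices_py batch valid_indices → Spec_calculate_skipped_indices_py batch valid_indices (calculate_skipped_indices_py batch valid_indices)

-- ===== LEMMAS AND PROOFS =====

-- the gap-emission loop over a strictly increasing list vs of values in [prev, total)
-- produces exactly the in-order complement of vs in range(prev, total)
lemma pv_gap (vs : List Int) (prev total : Int) (acc : List Int)
    (hs : vs.Pairwise (· < ·)) (hlo : ∀ v ∈ vs, prev ≤ v) (hhi : ∀ v ∈ vs, v < total) :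
    (vs.foldl (fun st v => (st.1 ++ PySem.List.pyRange st.2 v 1, v + 1)) (acc, prev)).1
      ++ PySem.List.pyRange (vs.foldl (fun st v => (st.1 ++ PySem.List.pyRange st.2 v 1, v + 1)) (acc, prev)).2 total 1
    = acc ++ (PySem.List.pyRange prev total 1).filter (fun i => !(vs.contains i)) := by
  induction vs generalizing prev acc with
  | nil => simp
  | cons v vs ih =>
    have hpv : prev ≤ v := hlo v (by simp)
    have hvt : v < total := hhi v (by simp)
    have hvw : ∀ w ∈ vs, v < w := by
      intro w hw; exact (List.pairwise_cons.1 hs).1 w hw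
    simp only [List.foldl_cons]
    rw [ih (v + 1) (acc ++ PySem.List.pyRange prev v 1) (List.Pairwise.of_cons hs)
        (fun w hw => by have := hvw w hw; omega)
        (fun w hw => hhi w (List.mem_cons_of_mem _ hw))]
    rw [PySem.List.pyRange_one_append prev v total hpv (by omega)]
    rw [PySem.List.pyRange_one_cons hvt]
    rw [List.filter_append, List.filter_cons]
    have hvc : ((v :: vs).contains v) = true := by simp
    simp only [hvc, Bool.not_true, if_neg (by simp : ¬ (false = true))]
    have h1 : (PySem.List.pyRange prev v 1).filter (fun i => !((v :: vs).contains i))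
        = PySem.List.pyRange prev v 1 := by
      apply List.filter_eq_self.2
      intro i hi
      have hm := (PySem.List.mem_pyRange_one).1 hi
      have hni : i ∉ v :: vs := by
        intro hmem
        rcases List.mem_cons.1 hmem with h | h
        · omega
        · have := hvw i h; omega
      simp [List.contains_eq_mem, hni]
    have h2 : (PySem.List.pyRange (v + 1) total 1).filter (fun i => !((v :: vs).contains i))
        = (PySem.List.pyRange (v + 1) total 1).filter (fun i => !(vs.contains i)) := by
      apply List.filter_congr
      intro i hi
      have hm := (PySem.List.mem_pyRange_one).1 hi
      have : ((v :: vs).contains i) = (vs.contains i) := by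
        simp only [List.contains_eq_mem, List.mem_cons]
        have : i ≠ v := by omega
        simp [this]
      rw [this]
    rw [h1, h2, List.append_assoc]

-- A's result is the ordered filter of range(total) by non-membership in valid_indices
lemma pv_a_eq_filter (batch : List (String × List Int)) (valid_indices : List Int) :
    calculate_skipped_indices_py batch valid_indices
      = (PySem.List.pyRange 0
          (batch.foldl (fun acc kv => max acc (kv.2.length : Int)) 0) 1).filter
          (fun i => !(valid_indices.contains i)) := by
  unfold calculate_skipped_indices_py
  by_cases hb : batch = []
  · simp [hb, PySem.List.pyRange]
  · rw [if_neg hb]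
    show PySem.List.sorted
        (PySem.Set.diff
          (PySem.Set.ofList (PySem.List.pyRange 0 (batch.foldl (fun acc kv => max acc (kv.2.length : Int)) 0) 1))
          (PySem.Set.ofList valid_indices))
        (fun x => x) false = _
    rw [PySem.Set.ofList_eq_self_of_nodup _ (PySem.List.nodup_pyRange_one _ _)]
    have hdiff : PySem.Set.diff (PySem.List.pyRange 0 (batch.foldl (fun acc kv => max acc (kv.2.length : Int)) 0) 1) (PySem.Set.ofList valid_indices)
        = (PySem.List.pyRange 0 (batch.foldl (fun acc kv => max acc (kv.2.length : Int)) 0) 1).filter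
            (fun i => !((PySem.Set.ofList valid_indices).contains i)) := rfl
    rw [hdiff]
    rw [PySem.List.sorted_eq_of_perm_of_pairwise_lt _ _ _ (List.Perm.refl _)
      ((PySem.List.pairwise_lt_pyRange_one _ _).filter _)]
    apply List.filter_congr
    intro i _
    have : ((PySem.Set.ofList valid_indices).contains i) = (valid_indices.contains i) := by
      simp [List.contains_eq_mem, PySem.Set.mem_ofList]
    rw [this]

-- ===== VERDICT (by name: the statement is the Claim_ definition above) =====
theorem calculate_skipped_indices_py_spec : Claim_equal_calculate_skipped_indices_py := by
  intro batch valid_indices _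
  unfold Spec_calculate_skipped_indices_py
  rw [pv_a_eq_filter]
  unfold calculate_skipped_indices_py_alt
  set T : Int := batch.foldl (fun acc kv => max acc (kv.2.length : Int)) 0 with hT
  set vs : List Int := PySem.List.sorted
      (PySem.Set.ofList (valid_indices.filter (fun v => decide (0 ≤ v) && decide (v < T))))
      (fun x => x) false with hvs
  have hmemvs : ∀ i, i ∈ vs ↔ (i ∈ valid_indices ∧ 0 ≤ i ∧ i < T) := by
    intro i
    rw [hvs, PySem.List.mem_sorted, PySem.Set.mem_ofList, List.mem_filter]
    simp
  rw [pv_gap vs 0 T [] (by rw [hvs]; exact PySem.List.sorted_ofList_pairwise_lt _)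
      (fun v hv => ((hmemvs v).1 hv).2.1) (fun v hv => ((hmemvs v).1 hv).2.2)]
  rw [List.nil_append]
  apply List.filter_congr
  intro i hi
  have hm := (PySem.List.mem_pyRange_one).1 hi
  have : (vs.contains i) = (valid_indices.contains i) := by
    simp only [List.contains_eq_mem, hmemvs i]
    simp only [decide_eq_decide]
    constructor
    · exact fun h => h.1
    · exact fun h => ⟨h, hm.1, hm.2⟩
  rw [this]
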